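-- pv_equiv track=rewrite | github.com/kbarriosr/PARQUESUN_ | tablero (2).py | es_casilla_especial
-- ===== SOURCE A (Python) =====
-- Casillas_Especiales = {
--     "Seguros": [5, 12, 17, 22, 29, 34, 41, 46, 53, 58, 65],  # Ajusta si es necesario
--     "Carcel": {  # Ubicación de la cárcel por color
--         "Rojo": 0,
--         "Verde": 17,
--         "Azul": 34,
--         "Amarillo": 51
--     },
--     "Llegada": {  # Primer casilla de llegada por color
--         "Rojo": 69,
--         "Verde": 77,
--         "Azul": 85,
--         "Amarillo": 93
--     }
-- }
--
-- def es_casilla_especial(casilla):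
--     """
--     Verifica si una casilla es especial (seguro, cárcel o llegada).
--     """
--     for tipo, ubicaciones in Casillas_Especiales.items():
--         if isinstance(ubicaciones, list) and casilla in ubicaciones:
--             return tipo
--         elif isinstance(ubicaciones, dict):
--             for color, posicion in ubicaciones.items():
--                 if casilla == posicion:
--                     return f"{tipo} ({color})"
--     return None
-- ===== SOURCE B (Python) =====
-- Casillas_Especiales = {
--     "Seguros": [5, 12, 17, 22, 29, 34, 41, 46, 53, 58, 65],
--     "Carcel": {"Rojo": 0, "Verde": 17, "Azul": 34, "Amarillo": 51},
--     "Llegada": {"Rojo": 69, "Verde": 77, "Azul": 85, "Amarillo": 93},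
-- }
--
-- _LABELS = {}
-- for _tipo in ("Llegada", "Carcel"):
--     for _color, _pos in Casillas_Especiales[_tipo].items():
--         _LABELS[_pos] = f"{_tipo} ({_color})"
-- for _pos in Casillas_Especiales["Seguros"]:
--     _LABELS[_pos] = "Seguros"
--
-- def es_casilla_especial(casilla):
--     """
--     Verifica si una casilla es especial (seguro, cárcel o llegada).
--     """
--     return _LABELS.get(casilla)
-- ===== Notes on version B (the rewrite author's own statement) =====
-- stated objective: idiomatic
-- what changed: Replaces the typed per-category scan (list membership plus nested dict loops) with one flat position-to-label dict precomputed once in reverse priority, so the function is a single table lookup.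
import Mathlib
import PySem

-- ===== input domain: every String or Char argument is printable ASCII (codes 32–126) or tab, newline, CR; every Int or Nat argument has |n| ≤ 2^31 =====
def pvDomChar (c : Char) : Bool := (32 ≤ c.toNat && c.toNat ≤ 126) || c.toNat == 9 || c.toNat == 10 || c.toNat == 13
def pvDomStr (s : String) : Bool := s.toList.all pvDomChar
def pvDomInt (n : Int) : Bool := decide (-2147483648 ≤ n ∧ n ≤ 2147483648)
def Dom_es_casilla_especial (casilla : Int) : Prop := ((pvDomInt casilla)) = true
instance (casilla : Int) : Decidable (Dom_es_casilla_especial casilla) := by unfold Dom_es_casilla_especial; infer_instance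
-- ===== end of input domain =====

-- B replaces A's per-category scan by a flat position→label dict built once; single lookup per call (idiomatic).

-- ===== PORT A =====
-- the module constant, as in the Python source
def pvSeguros : List Int := [5, 12, 17, 22, 29, 34, 41, 46, 53, 58, 65]
def pvCarcel : List (String × Int) := [("Rojo", 0), ("Verde", 17), ("Azul", 34), ("Amarillo", 51)]
def pvLlegada : List (String × Int) := [("Rojo", 69), ("Verde", 77), ("Azul", 85), ("Amarillo", 93)]

-- inner loop of A: first color whose position equals casilla → "tipo (color)"
def pvFindColor (tipo : String) (ubic : List (String × Int)) (casilla : Int) : Option String :=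
  match ubic with
  | [] => none
  | (color, pos) :: rest =>
      if casilla = pos then some (tipo ++ " (" ++ color ++ ")")
      else pvFindColor tipo rest casilla

def es_casilla_especial (casilla : Int) : Option String :=
  -- iterate the three items of Casillas_Especiales in insertion order
  if pvSeguros.contains casilla then some "Seguros"
  else match pvFindColor "Carcel" pvCarcel casilla with
  | some s => some s
  | none =>
    match pvFindColor "Llegada" pvLlegada casilla with
    | some s => some s
    | none => none

-- ===== PORT B =====
-- module-level flat table, built once: Llegada then Carcel entries, Seguros last (overwrite = priority)
def pvLabels : PySem.Dict Int String :=
  let d := pvLlegada.foldl (fun d cp => d.insert cp.2 ("Llegada (" ++ cp.1 ++ ")")) PySem.Dict.empty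
  let d := pvCarcel.foldl (fun d cp => d.insert cp.2 ("Carcel (" ++ cp.1 ++ ")")) d
  pvSeguros.foldl (fun d p => d.insert p "Seguros") d

def es_casilla_especial_alt (casilla : Int) : Option String :=
  pvLabels.get? casilla

-- ===== PRECONDITION & SPEC =====
def Spec_es_casilla_especial (casilla : Int) (out : Option String) : Prop := out = es_casilla_especial_alt casilla
instance (casilla : Int) (out : Option String) : Decidable (Spec_es_casilla_especial casilla out) := by unfold Spec_es_casilla_especial; infer_instance

-- ===== CLAIM (what is proved, stated in full; the proofs are below) =====
def Claim_equal_es_casilla_especial : Prop := ∀ (casilla : Int), Dom_es_casilla_especial casilla → Spec_es_casilla_especial casilla (es_casilla_especial casilla)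

-- ===== LEMMAS AND PROOFS =====

-- the table B builds, evaluated once to its literal association list
theorem pvLabels_items : pvLabels = PySem.Dict.mk
    [(69, "Llegada (Rojo)"), (77, "Llegada (Verde)"), (85, "Llegada (Azul)"),
     (93, "Llegada (Amarillo)"), (0, "Carcel (Rojo)"), (17, "Seguros"),
     (34, "Seguros"), (51, "Carcel (Amarillo)"), (5, "Seguros"), (12, "Seguros"),
     (22, "Seguros"), (29, "Seguros"), (41, "Seguros"), (46, "Seguros"),
     (53, "Seguros"), (58, "Seguros"), (65, "Seguros")] := by decide

-- ===== VERDICT (by name: the statement is the Claim_ definition above) =====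
theorem es_casilla_especial_spec : Claim_equal_es_casilla_especial := by
  intro casilla _
  unfold Spec_es_casilla_especial
  by_cases h0 : casilla = (0 : Int)
  · subst h0; decide
  by_cases h5 : casilla = (5 : Int)
  · subst h5; decide
  by_cases h12 : casilla = (12 : Int)
  · subst h12; decide
  by_cases h17 : casilla = (17 : Int)
  · subst h17; decide
  by_cases h22 : casilla = (22 : Int)
  · subst h22; decide
  by_cases h29 : casilla = (29 : Int)
  · subst h29; decide
  by_cases h34 : casilla = (34 : Int)
  · subst h34; decide
  by_cases h41 : casilla = (41 : Int)
  · subst h41; decide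
  by_cases h46 : casilla = (46 : Int)
  · subst h46; decide
  by_cases h51 : casilla = (51 : Int)
  · subst h51; decide
  by_cases h53 : casilla = (53 : Int)
  · subst h53; decide
  by_cases h58 : casilla = (58 : Int)
  · subst h58; decide
  by_cases h65 : casilla = (65 : Int)
  · subst h65; decide
  by_cases h69 : casilla = (69 : Int)
  · subst h69; decide
  by_cases h77 : casilla = (77 : Int)
  · subst h77; decide
  by_cases h85 : casilla = (85 : Int)
  · subst h85; decide
  by_cases h93 : casilla = (93 : Int)
  · subst h93; decide
  simp [es_casilla_especial, es_casilla_especial_alt, pvLabels_items, pvFindColor,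
    pvSeguros, pvCarcel, pvLlegada, PySem.Dict.get?, Ne.symm h0, Ne.symm h5, Ne.symm h12, Ne.symm h17, Ne.symm h22, Ne.symm h29,
    Ne.symm h34, Ne.symm h41, Ne.symm h46, Ne.symm h51, Ne.symm h53, Ne.symm h58,
    Ne.symm h65, Ne.symm h69, Ne.symm h77, Ne.symm h85, Ne.symm h93,
    h0, h5, h12, h17, h22, h29, h34, h41, h46, h51, h53, h58, h65, h69, h77, h85, h93]
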